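-- pv_equiv track=rewrite | github.com/lucaquaglia15/EcoRPCchem | analysis/SEM/SEM.py | valid_emission_lines
-- ===== SOURCE A (Python) =====
-- def valid_emission_lines(elements, peaks, tol=20):
--     valid_lines = set()
--
--     for lines in elements.values():
--         K, L = split_K_L(lines)
--
--         K_found = any(peak_present(e, peaks, tol) for e in K)
--         L_found = any(peak_present(e, peaks, tol) for e in L)
--
--         if L_found and not K_found:
--             continue  # reject element
--
--         valid_lines.update(K)
--         valid_lines.update(L)
--
--     return valid_lines
--
-- def split_K_L(lines):
--     if len(lines) <= 3: #We only have Ka1, Ka2 and Kb1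
--         return lines, [] #Return only K lines and empty L
--
--     split_idx = None #index of the list where we go from K to L lines
--
--     for i in range(1, len(lines)):
--         if (lines[i] + 50) < lines[i - 1]:
--             split_idx = i
--             break
--
--     #In principle this is not needed since we check before if the length of the emission dictionary element is <= 3 (i.e. if there is only K lines) but ok
--     #We can leave it just in case
--     if split_idx is None:
--         return lines, []
--
--     #K lines is whatever is before the split idx
--     #L lines is whatever is after the split idx
--     K = lines[:split_idx]
--     L = lines[split_idx:]
--     return K, L #K and L as lists
--
-- def peak_present(line_energy, peaks, tol=20):
--     return any(abs(p - line_energy) <= tol for p in peaks)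
-- ===== SOURCE B (Python) =====
-- def valid_emission_lines(elements, peaks, tol=20):
--     sp = sorted(peaks)
--     n = len(sp)
--     valid = set()
--     for lines in elements.values():
--         s = _split_point(lines)
--         if any(_hit(sp, 0, n, e - tol, e + tol) for e in lines[:s]) \
--            or not any(_hit(sp, 0, n, e - tol, e + tol) for e in lines[s:]):
--             valid.update(lines)
--     return valid
--
-- def _split_point(lines):
--     if len(lines) <= 3:
--         return len(lines)
--     for i in range(1, len(lines)):
--         if lines[i] + 50 < lines[i - 1]:
--             return i
--     return len(lines)
--
-- def _hit(sp, lo, hi, a, b):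
--     # any element of the sorted list sp[lo:hi] lying in [a, b]?
--     while lo < hi:
--         m = (lo + hi) // 2
--         if sp[m] < a:
--             lo = m + 1
--         elif sp[m] > b:
--             hi = m
--         else:
--             return True
--     return False
-- ===== Notes on version B (the rewrite author's own statement) =====
-- stated objective: faster
-- what changed: B sorts the peaks once and for each emission line does a hand-written binary search for a peak in [line-tol, line+tol] (and updates the set with the whole line list at once instead of splitting into K++L), replacing A's linear scan over all peaks for every line of every element.
import Mathlib
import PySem

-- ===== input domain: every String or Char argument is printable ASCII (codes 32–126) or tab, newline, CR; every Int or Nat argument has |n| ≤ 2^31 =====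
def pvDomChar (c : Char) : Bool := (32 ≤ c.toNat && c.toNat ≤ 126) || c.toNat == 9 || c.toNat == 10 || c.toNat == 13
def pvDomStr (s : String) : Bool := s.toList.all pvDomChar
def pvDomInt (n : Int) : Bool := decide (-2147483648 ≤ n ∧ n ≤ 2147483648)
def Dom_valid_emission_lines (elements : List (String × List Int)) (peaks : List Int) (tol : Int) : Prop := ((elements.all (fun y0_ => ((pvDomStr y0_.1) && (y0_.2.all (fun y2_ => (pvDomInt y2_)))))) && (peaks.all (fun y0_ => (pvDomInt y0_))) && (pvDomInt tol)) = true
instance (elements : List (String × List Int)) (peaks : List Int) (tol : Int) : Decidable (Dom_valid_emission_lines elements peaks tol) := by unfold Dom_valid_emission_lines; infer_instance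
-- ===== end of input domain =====

-- B sorts the peaks once and binary-searches for a peak in [line-tol, line+tol], replacing A's
-- linear scan of all peaks for every line (objective: faster).


-- ===== PORT A =====
-- any(abs(p - line_energy) <= tol for p in peaks)
def peak_present (line_energy : Int) (peaks : List Int) (tol : Int) : Bool :=
  peaks.any (fun p => decide (((p - line_energy).natAbs : Int) ≤ tol))

-- the 'for i in range(1, len(lines)): if lines[i]+50 < lines[i-1]: split_idx = i; break' loop;
-- every index it visits is in [1, len(lines)), so Python's lines[i] is exactly getD i 0 here
def splitLoopA (lines : List Int) : List Nat → Option Nat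
  | [] => none
  | i :: rest =>
      if lines.getD i 0 + 50 < lines.getD (i - 1) 0 then some i else splitLoopA lines rest

def split_K_L (lines : List Int) : List Int × List Int :=
  if lines.length ≤ 3 then (lines, [])
  else
    match splitLoopA lines (List.range' 1 (lines.length - 1)) with
    | none => (lines, [])
    -- lines[:s], lines[s:] with 0 ≤ s < len(lines): exactly take/drop
    | some s => (lines.take s, lines.drop s)

def valid_emission_lines (elements : List (String × List Int)) (peaks : List Int) (tol : Int) : List Int :=
  elements.foldl
    (fun vl kv =>
      let KL := split_K_L kv.2
      let K_found := KL.1.any (fun e => peak_present e peaks tol)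
      let L_found := KL.2.any (fun e => peak_present e peaks tol)
      if L_found && !K_found then vl
      else PySem.Set.update (PySem.Set.update vl KL.1) KL.2)
    PySem.Set.empty

-- ===== PORT B =====
-- while-loop binary search: is any element of the sorted list sp[lo:hi] inside [a, b]?
-- indices it visits are < hi ≤ len(sp), so sp[m] is exactly getD m 0
def hitB (sp : List Int) (lo hi : Nat) (a b : Int) : Bool :=
  if h : lo < hi then
    let m := (lo + hi) / 2
    if sp.getD m 0 < a then hitB sp (m + 1) hi a b
    else if b < sp.getD m 0 then hitB sp lo m a b
    else true
  else false
termination_by hi - lo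
decreasing_by all_goals omega

def spLoopB (lines : List Int) : List Nat → Nat
  | [] => lines.length
  | i :: rest =>
      if lines.getD i 0 + 50 < lines.getD (i - 1) 0 then i else spLoopB lines rest

def splitPointB (lines : List Int) : Nat :=
  if lines.length ≤ 3 then lines.length
  else spLoopB lines (List.range' 1 (lines.length - 1))

def valid_emission_lines_alt (elements : List (String × List Int)) (peaks : List Int) (tol : Int) : List Int :=
  let sp := PySem.List.sorted peaks (fun x => x) false
  let n := sp.length
  elements.foldl
    (fun vl kv =>
      let s := splitPointB kv.2
      if (kv.2.take s).any (fun e => hitB sp 0 n (e - tol) (e + tol))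
         || !((kv.2.drop s).any (fun e => hitB sp 0 n (e - tol) (e + tol)))
      then PySem.Set.update vl kv.2
      else vl)
    PySem.Set.empty

-- ===== PRECONDITION & SPEC =====
def Spec_valid_emission_lines (elements : List (String × List Int)) (peaks : List Int) (tol : Int) (out : List Int) : Prop := out = valid_emission_lines_alt elements peaks tol
instance (elements : List (String × List Int)) (peaks : List Int) (tol : Int) (out : List Int) : Decidable (Spec_valid_emission_lines elements peaks tol out) := by unfold Spec_valid_emission_lines; infer_instance

-- ===== CLAIM (what is proved, stated in full; the proofs are below) =====
def Claim_equal_valid_emission_lines : Prop := ∀ (elements : List (String × List Int)) (peaks : List Int) (tol : Int), Dom_valid_emission_lines elements peaks tol → Spec_valid_emission_lines elements peaks tol (valid_emission_lines elements peaks tol)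

-- ===== LEMMAS AND PROOFS =====

lemma getD_mono (sp : List Int) (hsp : sp.Pairwise (fun x y => x ≤ y))
    {i j : Nat} (hij : i ≤ j) (hj : j < sp.length) : sp.getD i 0 ≤ sp.getD j 0 := by
  rcases Nat.lt_or_ge i j with h | h
  · have hi : i < sp.length := lt_of_le_of_lt hij hj
    rw [List.getD_eq_getElem _ _ hi, List.getD_eq_getElem _ _ hj]
    exact List.pairwise_iff_getElem.mp hsp i j hi hj h
  · have : i = j := le_antisymm hij h
    simp [this]

lemma hitB_iff (sp : List Int) (hsp : sp.Pairwise (fun x y => x ≤ y)) (a b : Int)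
    (lo hi : Nat) (hhi : hi ≤ sp.length) :
    hitB sp lo hi a b = true ↔
      ∃ i, lo ≤ i ∧ i < hi ∧ a ≤ sp.getD i 0 ∧ sp.getD i 0 ≤ b := by
  generalize hk : hi - lo = k
  induction k using Nat.strong_induction_on generalizing lo hi with
  | _ k ih =>
  rw [hitB]
  by_cases h : lo < hi
  · simp only [h, dif_pos]
    set m := (lo + hi) / 2 with hm
    have hmlo : lo ≤ m := by omega
    have hmhi : m < hi := by omega
    by_cases h1 : sp.getD m 0 < a
    · rw [if_pos h1, ih (hi - (m + 1)) (by omega) (m + 1) hi hhi rfl]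
      constructor
      · rintro ⟨i, h2, h3, h4, h5⟩; exact ⟨i, by omega, h3, h4, h5⟩
      · rintro ⟨i, h2, h3, h4, h5⟩
        refine ⟨i, ?_, h3, h4, h5⟩
        by_contra hc
        have : sp.getD i 0 ≤ sp.getD m 0 := getD_mono sp hsp (by omega) (by omega)
        omega
    · rw [if_neg h1]
      by_cases h2 : b < sp.getD m 0
      · rw [if_pos h2, ih (m - lo) (by omega) lo m (by omega) rfl]
        constructor
        · rintro ⟨i, h3, h4, h5, h6⟩; exact ⟨i, h3, by omega, h5, h6⟩
        · rintro ⟨i, h3, h4, h5, h6⟩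
          refine ⟨i, h3, ?_, h5, h6⟩
          by_contra hc
          have : sp.getD m 0 ≤ sp.getD i 0 := getD_mono sp hsp (by omega) (by omega)
          omega
      · rw [if_neg h2]
        simp only [true_iff]
        exact ⟨m, hmlo, hmhi, by omega, by omega⟩
  · rw [dif_neg h]
    constructor
    · intro hc; simp at hc
    · rintro ⟨i, h2, h3, _, _⟩; omega

-- the binary search over the sorted peaks answers exactly A's linear scan
lemma hitB_eq_peak_present (peaks : List Int) (tol e : Int) :
    hitB (PySem.List.sorted peaks (fun x => x) false) 0
        (PySem.List.sorted peaks (fun x => x) false).length (e - tol) (e + tol)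
      = peak_present e peaks tol := by
  set sp := PySem.List.sorted peaks (fun x => x) false with hsp
  have hpw : sp.Pairwise (fun x y => x ≤ y) := PySem.List.sorted_pairwise peaks (fun x => x) 
  have hiff := hitB_iff sp hpw (e - tol) (e + tol) 0 sp.length le_rfl
  rcases h : hitB sp 0 sp.length (e - tol) (e + tol) with _ | _
  · symm
    rw [Bool.eq_false_iff]
    intro hpp
    rw [peak_present, List.any_eq_true] at hpp
    obtain ⟨p, hp, hle⟩ := hpp
    have hps : p ∈ sp := by
      rw [hsp]; exact (PySem.List.mem_sorted peaks (fun x => x) false p).mpr hp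
    obtain ⟨i, hi, hgi⟩ := List.getElem_of_mem hps
    have : hitB sp 0 sp.length (e - tol) (e + tol) = true := by
      rw [hiff]
      refine ⟨i, Nat.zero_le _, hi, ?_, ?_⟩ <;>
        · rw [List.getD_eq_getElem _ _ hi, hgi]
          simp only [decide_eq_true_eq] at hle
          omega
    rw [h] at this; exact Bool.false_ne_true this
  · symm
    rw [h] at hiff
    obtain ⟨i, _, hi, h4, h5⟩ := hiff.mp rfl
    rw [List.getD_eq_getElem _ _ hi] at h4 h5
    have hmem : sp[i] ∈ sp := List.getElem_mem hi
    have hpk : sp[i] ∈ peaks := (PySem.List.mem_sorted peaks (fun x => x) false _).mp hmem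
    rw [peak_present, List.any_eq_true]
    exact ⟨sp[i], hpk, by simp only [decide_eq_true_eq]; omega⟩

lemma spLoopB_eq (lines : List Int) (idxs : List Nat) :
    spLoopB lines idxs = (splitLoopA lines idxs).getD lines.length := by
  induction idxs with
  | nil => rfl
  | cons i rest ih =>
      rw [spLoopB, splitLoopA]
      split_ifs with h
      · rfl
      · exact ih

lemma split_K_L_eq (lines : List Int) :
    split_K_L lines = (lines.take (splitPointB lines), lines.drop (splitPointB lines)) := by
  rw [split_K_L, splitPointB]
  split_ifs with h
  · simp
  · rw [spLoopB_eq]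
    rcases hA : splitLoopA lines (List.range' 1 (lines.length - 1)) with _ | s
    · simp
    · simp

lemma body_eq (peaks : List Int) (tol : Int) (vl : List Int) (kv : String × List Int) :
    (let KL := split_K_L kv.2
     let K_found := KL.1.any (fun e => peak_present e peaks tol)
     let L_found := KL.2.any (fun e => peak_present e peaks tol)
     if L_found && !K_found then vl
     else PySem.Set.update (PySem.Set.update vl KL.1) KL.2)
    =
    (let sp := PySem.List.sorted peaks (fun x => x) false
     let s := splitPointB kv.2
     if (kv.2.take s).any (fun e => hitB sp 0 sp.length (e - tol) (e + tol))
        || !((kv.2.drop s).any (fun e => hitB sp 0 sp.length (e - tol) (e + tol)))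
     then PySem.Set.update vl kv.2
     else vl) := by
  simp only [split_K_L_eq]
  have hany : ∀ l : List Int,
      l.any (fun e => hitB (PySem.List.sorted peaks (fun x => x) false) 0
          (PySem.List.sorted peaks (fun x => x) false).length (e - tol) (e + tol))
        = l.any (fun e => peak_present e peaks tol) := by
    intro l
    exact PySem.List.any_congr_mem (fun e _ => hitB_eq_peak_present peaks tol e)
  rw [hany, hany]
  set K_found := (kv.2.take (splitPointB kv.2)).any (fun e => peak_present e peaks tol)
  set L_found := (kv.2.drop (splitPointB kv.2)).any (fun e => peak_present e peaks tol)
  have hcond : (K_found || !L_found) = !(L_found && !K_found) := by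
    cases K_found <;> cases L_found <;> rfl
  rw [hcond]
  cases hLB : (L_found && !K_found) with
  | true => simp
  | false =>
      simp only [Bool.not_false, Bool.false_eq_true, if_false, if_true]
      conv_rhs => rw [← List.take_append_drop (splitPointB kv.2) kv.2]
      rw [PySem.Set.update_append]

-- ===== VERDICT (by name: the statement is the Claim_ definition above) =====
theorem valid_emission_lines_spec : Claim_equal_valid_emission_lines := by
  intro elements peaks tol _
  unfold Spec_valid_emission_lines valid_emission_lines valid_emission_lines_alt
  apply PySem.List.foldl_congr_mem
  intro acc kv _
  exact body_eq peaks tol acc kv
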